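-- pv_equiv track=rewrite | github.com/umair-fa22/MegiLance | backend/app/services/advanced_ai.py | _skills_similar
-- ===== SOURCE A (Python) =====
-- def _skills_similar(skill1: str, skill2: str) -> bool:
--     """Check if skills are similar"""
--     # Simplified - would use word embeddings in production
--     similarity_map = {
--         "python": ["python3", "django", "flask", "fastapi"],
--         "javascript": ["js", "node.js", "react", "vue", "angular"],
--         "design": ["ui/ux", "graphic design", "web design"],
--         "writing": ["content writing", "copywriting", "technical writing"]
--     }
--
--     skill1_lower = skill1.lower()
--     skill2_lower = skill2.lower()
--
--     for main_skill, similar_skills in similarity_map.items():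
--         if skill1_lower == main_skill and skill2_lower in similar_skills:
--             return True
--         if skill2_lower == main_skill and skill1_lower in similar_skills:
--             return True
--
--     return False
-- ===== SOURCE B (Python) =====
-- _SIMILARITY_MAP = {
--     "python": ["python3", "django", "flask", "fastapi"],
--     "javascript": ["js", "node.js", "react", "vue", "angular"],
--     "design": ["ui/ux", "graphic design", "web design"],
--     "writing": ["content writing", "copywriting", "technical writing"]
-- }
--
-- # Flatten the map once into a symmetric set of ordered pairs.
-- _PAIRS = {(m, s) for m, sims in _SIMILARITY_MAP.items() for s in sims}
-- _PAIRS |= {(s, m) for (m, s) in set(_PAIRS)}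
--
-- def _skills_similar(skill1: str, skill2: str) -> bool:
--     """Check if skills are similar"""
--     return (skill1.lower(), skill2.lower()) in _PAIRS
-- ===== Notes on version B (the rewrite author's own statement) =====
-- stated objective: simpler
-- what changed: Instead of scanning each map entry and testing both directions inside the loop, B flattens the similarity map once into a symmetric set of (skill, skill) pairs and answers with a single membership test on the lowered pair.
import Mathlib
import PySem

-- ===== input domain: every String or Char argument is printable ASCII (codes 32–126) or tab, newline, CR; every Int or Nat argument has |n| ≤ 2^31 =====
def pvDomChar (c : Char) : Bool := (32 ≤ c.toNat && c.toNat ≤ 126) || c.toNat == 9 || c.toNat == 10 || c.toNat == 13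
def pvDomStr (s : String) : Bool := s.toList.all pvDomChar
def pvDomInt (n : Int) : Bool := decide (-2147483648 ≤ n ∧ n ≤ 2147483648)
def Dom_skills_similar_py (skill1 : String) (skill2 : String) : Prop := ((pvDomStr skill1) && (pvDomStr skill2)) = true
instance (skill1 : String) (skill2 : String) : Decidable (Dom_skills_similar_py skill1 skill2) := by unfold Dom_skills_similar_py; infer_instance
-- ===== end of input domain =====

-- B replaces A's per-entry two-directional scan of the similarity map by a flat symmetric set of pairs built once, answering with a single membership test (objective: simpler).


-- ===== PORT A =====
-- similarity_map as an association list in insertion order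
def pvSimMap : List (String × List String) :=
  [("python", ["python3", "django", "flask", "fastapi"]),
   ("javascript", ["js", "node.js", "react", "vue", "angular"]),
   ("design", ["ui/ux", "graphic design", "web design"]),
   ("writing", ["content writing", "copywriting", "technical writing"])]

-- A's for-loop over similarity_map.items() with its two early returns
def pvALoop (s1 s2 : String) : List (String × List String) → Bool
  | [] => false
  | (m, sims) :: rest =>
    if s1 == m && sims.contains s2 then true
    else if s2 == m && sims.contains s1 then true
    else pvALoop s1 s2 rest

def skills_similar_py (skill1 : String) (skill2 : String) : Bool :=
  pvALoop (PySem.Str.lower skill1) (PySem.Str.lower skill2) pvSimMap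

-- ===== PORT B =====
-- the flattened pair set, built once: forward pairs, then their swaps
def pvPairsFwd : List (String × String) :=
  pvSimMap.flatMap (fun p => p.2.map (fun s => (p.1, s)))

def pvPairsAll : List (String × String) :=
  pvPairsFwd ++ pvPairsFwd.map (fun p => (p.2, p.1))

def skills_similar_py_alt (skill1 : String) (skill2 : String) : Bool :=
  pvPairsAll.contains (PySem.Str.lower skill1, PySem.Str.lower skill2)

-- ===== PRECONDITION & SPEC =====
def Spec_skills_similar_py (skill1 : String) (skill2 : String) (out : Bool) : Prop := out = skills_similar_py_alt skill1 skill2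
instance (skill1 : String) (skill2 : String) (out : Bool) : Decidable (Spec_skills_similar_py skill1 skill2 out) := by unfold Spec_skills_similar_py; infer_instance

-- ===== CLAIM (what is proved, stated in full; the proofs are below) =====
def Claim_equal_skills_similar_py : Prop := ∀ (skill1 : String) (skill2 : String), Dom_skills_similar_py skill1 skill2 → Spec_skills_similar_py skill1 skill2 (skills_similar_py skill1 skill2)

-- ===== LEMMAS AND PROOFS =====

-- ===== VERDICT (by name: the statement is the Claim_ definition above) =====
lemma pvLoop_eq (s1 s2 : String) : ∀ L : List (String × List String),
    pvALoop s1 s2 L =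
      ((L.flatMap fun p => p.2.map fun s => (p.1, s)).contains (s1, s2) ||
       (L.flatMap fun p => p.2.map fun s => (p.1, s)).contains (s2, s1))
  | [] => by simp [pvALoop]
  | (m, sims) :: rest => by
    rw [pvALoop, pvLoop_eq s1 s2 rest, Bool.eq_iff_iff]
    simp [List.contains_eq_mem, List.mem_map, List.mem_append, Prod.ext_iff]
    constructor
    · rintro (⟨h1, h2⟩ | ⟨h1, h2⟩ | h | h)
      · exact Or.inl (Or.inl ⟨h2, h1.symm⟩)
      · exact Or.inr (Or.inl ⟨h2, h1.symm⟩)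
      · exact Or.inl (Or.inr h)
      · exact Or.inr (Or.inr h)
    · rintro ((⟨h2, h1⟩ | h) | ⟨h2, h1⟩ | h)
      · exact Or.inl ⟨h1.symm, h2⟩
      · exact Or.inr (Or.inr (Or.inl h))
      · exact Or.inr (Or.inl ⟨h1.symm, h2⟩)
      · exact Or.inr (Or.inr (Or.inr h))

lemma pvSwap_mem (x y : String) (l : List (String × String)) :
    (x, y) ∈ l.map (fun p => (p.2, p.1)) ↔ (y, x) ∈ l := by
  simp [List.mem_map, Prod.ext_iff]

lemma pvMain (s1 s2 : String) (L : List (String × List String)) :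
    pvALoop s1 s2 L =
      (((L.flatMap fun p => p.2.map fun s => (p.1, s)) ++
        ((L.flatMap fun p => p.2.map fun s => (p.1, s)).map fun p => (p.2, p.1))).contains
        (s1, s2)) := by
  rw [pvLoop_eq, Bool.eq_iff_iff]
  simp only [List.contains_eq_mem, List.mem_append, decide_eq_true_eq, Bool.or_eq_true]
  rw [pvSwap_mem]

theorem skills_similar_py_spec : Claim_equal_skills_similar_py := by
  intro s1 s2 _
  unfold Spec_skills_similar_py skills_similar_py skills_similar_py_alt pvPairsAll pvPairsFwd
  exact pvMain (PySem.Str.lower s1) (PySem.Str.lower s2) pvSimMap
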